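-- pv_equiv track=rewrite | github.com/ntornow/unity2rbxlx | converter/converter/fbx_binary.py | _flip_winding
-- ===== SOURCE A (Python) =====
-- def _flip_winding(indices: list[int]) -> list[int]:
--     """Flip polygon winding in a PolygonVertexIndex array.
--
--     FBX encodes polygons as sequences of indices where the last index of
--     each polygon is bit-XOR'd with -1 (negated and decremented). Reversing
--     the order within each polygon flips the winding; we preserve the
--     end-of-polygon marker on the new last index.
--     """
--     out: list[int] = []
--     start = 0
--     for i, v in enumerate(indices):
--         if v < 0:  # end-of-polygon marker
--             # Unwrap last index
--             last = -v - 1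
--             poly = indices[start:i] + [last]
--             # Reverse, then re-wrap the new last index
--             rev = list(reversed(poly))
--             rev[-1] = -rev[-1] - 1
--             out.extend(rev)
--             start = i + 1
--     return out
-- ===== SOURCE B (Python) =====
-- def _flip_winding(indices: list[int]) -> list[int]:
--     """Index-permutation formulation: within a polygon spanning positions
--     p..m (m the marker), the output slot j takes its value from input slot
--     p + m - j; the marker value is unwrapped (-x-1) when read from slot m
--     and re-wrapped (-x-1) when written to slot m. No slicing and no list
--     reversal; indices after the final marker produce no polygon."""
--     out: list[int] = []
--     p = 0
--     for m, v in enumerate(indices):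
--         if v < 0:
--             for j in range(p, m + 1):
--                 s = p + m - j
--                 x = indices[s]
--                 if s == m:
--                     x = -x - 1
--                 if j == m:
--                     x = -x - 1
--                 out.append(x)
--             p = m + 1
--     return out
-- ===== Notes on version B (the rewrite author's own statement) =====
-- stated objective: alternative
-- what changed: A builds each polygon by slicing the array, reversing the slice and patching its last element; B never slices or reverses: it emits output slots directly by the index permutation s = p + m - j, unwrapping the value when read from the marker slot and re-wrapping when written to it.
import Mathlib
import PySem

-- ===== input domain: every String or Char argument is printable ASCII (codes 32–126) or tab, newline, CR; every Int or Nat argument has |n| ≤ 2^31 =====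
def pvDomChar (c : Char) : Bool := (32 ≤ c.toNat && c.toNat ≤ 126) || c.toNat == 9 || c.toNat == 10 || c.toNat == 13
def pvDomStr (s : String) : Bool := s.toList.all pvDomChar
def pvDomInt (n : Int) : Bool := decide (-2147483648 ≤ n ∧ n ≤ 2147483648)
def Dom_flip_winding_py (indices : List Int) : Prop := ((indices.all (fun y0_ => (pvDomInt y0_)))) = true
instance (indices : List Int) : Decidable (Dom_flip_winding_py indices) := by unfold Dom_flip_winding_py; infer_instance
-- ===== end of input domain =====

-- B replaces A's slice-reverse-patch treatment of each polygon by a direct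
-- index permutation (output slot j reads input slot p + m - j, unwrapping at
-- the marker source and re-wrapping at the marker destination); objective:
-- alternative formulation, same O(n) cost.

-- ===== PORT A =====
-- loop body of A's 'for i, v in enumerate(indices)': state = (out, start)
def pvStepA (indices : List Int) (st : List Int × Int) (iv : Int × Int) : List Int × Int :=
  if iv.2 < 0 then
    let last := -iv.2 - 1
    let poly := PySem.List.slice indices (some st.2) (some iv.1) ++ [last]
    let rev := poly.reverse
    -- rev[-1] = -rev[-1] - 1  (rev is nonempty, so the default of pyGetD is never used)
    let rev2 := PySem.List.pySetD rev (-1) (-(PySem.List.pyGetD rev (-1) 0) - 1)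
    (st.1 ++ rev2, iv.1 + 1)
  else st

def flip_winding_py (indices : List Int) : List Int :=
  ((PySem.List.enumerate indices 0).foldl (pvStepA indices) ([], 0)).1

-- ===== PORT B =====
-- inner loop 'for j in range(p, m + 1): …' of Source B (indices[s] is always in
-- range when this loop runs, so pyGetD's default is never used)
def pvInnerB (indices : List Int) (p m : Int) (out : List Int) : List Int :=
  (PySem.List.pyRange p (m + 1) 1).foldl (fun acc j =>
    let s := p + m - j
    let x := PySem.List.pyGetD indices s 0
    let x1 := if s = m then -x - 1 else x
    let x2 := if j = m then -x1 - 1 else x1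
    acc ++ [x2]) out

-- outer loop body of Source B's 'for m, v in enumerate(indices)': state = (out, p)
def pvStepB (indices : List Int) (st : List Int × Int) (mv : Int × Int) : List Int × Int :=
  if mv.2 < 0 then (pvInnerB indices st.2 mv.1 st.1, mv.1 + 1) else st

def flip_winding_py_alt (indices : List Int) : List Int :=
  ((PySem.List.enumerate indices 0).foldl (pvStepB indices) ([], 0)).1

-- ===== PRECONDITION & SPEC =====
def Spec_flip_winding_py (indices : List Int) (out : List Int) : Prop := out = flip_winding_py_alt indices
instance (indices : List Int) (out : List Int) : Decidable (Spec_flip_winding_py indices out) := by unfold Spec_flip_winding_py; infer_instance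

-- ===== CLAIM (what is proved, stated in full; the proofs are below) =====
def Claim_equal_flip_winding_py : Prop := ∀ (indices : List Int), Dom_flip_winding_py indices → Spec_flip_winding_py indices (flip_winding_py indices)

-- ===== LEMMAS AND PROOFS =====

-- proof-only intermediate form both ports are reduced to: the list of polygon
-- groups (marker unwrapped into the last slot), each then reversed with its
-- new last element re-wrapped
def pvGroups : List Int → List Int → List (List Int)
  | _, [] => []
  | buf, v :: rest =>
    if v < 0 then (buf ++ [-v - 1]) :: pvGroups [] rest
    else pvGroups (buf ++ [v]) rest

def pvTransform (g : List Int) : List Int :=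
  PySem.List.pySetD g.reverse (-1) (-(PySem.List.pyGetD g.reverse (-1) 0) - 1)

-- writing at index -1 replaces the last element
lemma pv_pySetD_neg_one (r : List Int) (hr : r ≠ []) (y : Int) :
    PySem.List.pySetD r (-1) y = r.dropLast ++ [y] := by
  have h1 : 1 ≤ r.length := List.length_pos_iff.mpr hr
  simp [PySem.List.pySetD, PySem.List.pySet?, PySem.List.pyIdx?, h1, hr,
    List.set_eq_take_append_cons_drop, List.dropLast_eq_take]

-- pvTransform in closed form
lemma pv_transform_eq (g : List Int) (hg : g ≠ []) :
    pvTransform g = g.reverse.dropLast ++ [-(g.getD 0 0) - 1] := by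
  have hr : g.reverse ≠ [] := by simpa using hg
  unfold pvTransform
  rw [PySem.List.pyGetD_neg_one g.reverse (d := 0) hr, pv_pySetD_neg_one _ hr]
  congr 2
  rw [List.getLast_reverse]
  cases g with
  | nil => exact absurd rfl hg
  | cons a l => simp

-- extending a slice by one element: xs[s:k+1] = xs[s:k] ++ [xs[k]]
lemma pv_slice_ext (xs : List Int) (s : Int) (k : Nat) (v : Int) (rest : List Int)
    (h0 : 0 ≤ s) (hk : s ≤ (k : Int)) (hd : xs.drop k = v :: rest) :
    PySem.List.slice xs (some s) (some ((k : Int) + 1)) =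
      PySem.List.slice xs (some s) (some (k : Int)) ++ [v] := by
  have hx : xs[k]? = some v := by
    have h := (List.head?_drop (l := xs) (i := k)).symm
    rw [hd] at h; simpa using h
  rw [PySem.List.slice_toNat xs h0 (by positivity),
      PySem.List.slice_toNat xs h0 (by positivity)]
  have ht : ((k : Int) + 1).toNat = k + 1 := by omega
  have hk' : (k : Int).toNat = k := by omega
  have hts : s.toNat ≤ k := by omega
  rw [ht, hk']
  have h1 : k + 1 - s.toNat = (k - s.toNat) + 1 := by omega
  rw [h1, List.take_add_one]
  have : (xs.drop s.toNat)[k - s.toNat]? = some v := by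
    rw [List.getElem?_drop]
    rwa [Nat.add_sub_cancel' hts]
  simp [this]

-- A's loop invariant: at position k with open slice xs[start:k] = buf, the
-- remaining fold produces out ++ the grouped transform of buf and the suffix
lemma pv_mainA (indices : List Int) : ∀ (rest : List Int) (k : Nat) (out buf : List Int) (start : Int),
    0 ≤ start → start ≤ (k : Int) →
    indices.drop k = rest →
    PySem.List.slice indices (some start) (some (k : Int)) = buf →
    ((PySem.List.enumerate rest (k : Int)).foldl (pvStepA indices) (out, start)).1
      = out ++ (pvGroups buf rest).flatMap pvTransform := by
  intro rest
  induction rest with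
  | nil => intro k out buf start _ _ _ _; simp [PySem.List.enumerate_nil, pvGroups]
  | cons v rest ih =>
    intro k out buf start h0 hk hd hs
    rw [PySem.List.enumerate_cons, List.foldl_cons]
    by_cases hv : v < 0
    · have hstep : pvStepA indices (out, start) ((k : Int), v)
          = (out ++ pvTransform (buf ++ [-v - 1]), (k : Int) + 1) := by
        simp [pvStepA, pvTransform, hv, hs]
      rw [hstep]
      have hd' : indices.drop (k + 1) = rest := by
        rw [← List.drop_drop, hd]; simp
      have hs' : PySem.List.slice indices (some ((k + 1 : Nat) : Int)) (some ((k + 1 : Nat) : Int)) = [] := by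
        rw [PySem.List.slice_natCast]; simp
      have := ih (k + 1) (out ++ pvTransform (buf ++ [-v - 1])) [] ((k + 1 : Nat) : Int)
        (by positivity) (le_refl _) hd' hs'
      push_cast at this ⊢
      rw [this]
      simp [pvGroups, hv, List.flatMap_cons]
    · have hstep : pvStepA indices (out, start) ((k : Int), v) = (out, start) := by
        simp [pvStepA, hv]
      rw [hstep]
      have hd' : indices.drop (k + 1) = rest := by
        rw [← List.drop_drop, hd]; simp
      have hs' : PySem.List.slice indices (some start) (some ((k + 1 : Nat) : Int)) = buf ++ [v] :=
        by push_cast; exact pv_slice_ext indices start k v rest h0 hk hd ▸ (by rw [hs])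
      have := ih (k + 1) out (buf ++ [v]) start h0 (by push_cast; omega) hd' hs'
      push_cast at this ⊢
      rw [this]
      simp [pvGroups, hv]

-- B's inner loop emits exactly the transform of the open polygon
lemma pv_inner (indices : List Int) (k : Nat) (out buf : List Int) (start : Int) (v : Int)
    (h0 : 0 ≤ start) (hk : start ≤ (k : Int))
    (hx : indices[k]? = some v)
    (hs : PySem.List.slice indices (some start) (some (k : Int)) = buf) :
    pvInnerB indices start (k : Int) out = out ++ pvTransform (buf ++ [-v - 1]) := by
  obtain ⟨st, rfl⟩ : ∃ s : Nat, start = (s : Int) := ⟨start.toNat, (Int.toNat_of_nonneg h0).symm⟩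
  have hstk : st ≤ k := by exact_mod_cast hk
  have hklen : k < indices.length := (List.getElem?_eq_some_iff.mp hx).1
  have hvk : indices[k] = v := (List.getElem?_eq_some_iff.mp hx).2
  have hbuf : buf = (indices.drop st).take (k - st) := by
    rw [← hs, PySem.List.slice_natCast]
  have hblen : buf.length = k - st := by rw [hbuf]; simp; omega
  set n := k - st with hn
  have hpoly_len : (buf ++ [-v-1]).length = n + 1 := by simp [hblen]
  have hpoly_last : (buf ++ [-v-1]).getD n 0 = -v - 1 := by
    rw [List.getD_eq_getElem _ _ (by omega), List.getElem_append_right (by omega)]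
    simp [hblen]
  have hpoly_mid : ∀ u, u < n → (buf ++ [-v-1]).getD u 0 = indices.getD (st + u) 0 := by
    intro u hu
    rw [List.getD_eq_getElem _ _ (by omega), List.getElem_append_left (by omega),
        List.getElem_of_eq hbuf, List.getElem_take, List.getElem_drop,
        List.getD_eq_getElem _ _ (by omega)]
  unfold pvInnerB
  rw [PySem.List.pyRange_one]
  have harg : (((k:Int)+1) - st).toNat = n + 1 := by omega
  rw [harg, List.foldl_map, PySem.List.foldl_append_singleton_eq_map,
      pv_transform_eq _ (by simp)]
  congr 1
  trans ((List.range (n+1)).map (fun t =>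
    if t = n then -((buf ++ [-v-1]).getD 0 0) - 1 else (buf ++ [-v-1]).getD (n - t) 0))
  · apply List.map_congr_left
    intro t ht
    have htn : t ≤ n := by simpa [Nat.lt_succ_iff] using ht
    by_cases h1 : t = n
    · subst h1
      rw [if_pos rfl]
      have hj : (st:Int) + ((n:Nat):Int) = (k:Int) := by omega
      rw [if_pos hj]
      by_cases hz : n = 0
      · -- single-index polygon: unwrap then re-wrap gives v back
        have hsc : (st:Int) + (k:Int) - ((st:Int) + ((n:Nat):Int)) = (k:Int) := by omega
        rw [if_pos hsc]
        have hkc : (st:Int) + (k:Int) - ((st:Int) + ((n:Nat):Int)) = ((k:Nat):Int) := by omega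
        rw [hkc, PySem.List.pyGetD_natCast, List.getD_eq_getElem _ _ hklen, hvk]
        have h00 : (buf ++ [-v-1]).getD 0 0 = -v - 1 := by
          rw [show (0:Nat) = n from hz.symm]; exact hpoly_last
        rw [h00]
      · have hsc : ¬ ((st:Int) + (k:Int) - ((st:Int) + ((n:Nat):Int)) = (k:Int)) := by omega
        rw [if_neg hsc]
        have hstc : (st:Int) + (k:Int) - ((st:Int) + ((n:Nat):Int)) = ((st:Nat):Int) := by omega
        rw [hstc, PySem.List.pyGetD_natCast]
        have h00 : (buf ++ [-v-1]).getD 0 0 = indices.getD (st + 0) 0 := hpoly_mid 0 (by omega)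
        rw [h00, Nat.add_zero]
    · have htn' : t < n := by omega
      rw [if_neg h1]
      have hj : ¬ ((st:Int) + ((t:Nat):Int) = (k:Int)) := by omega
      rw [if_neg hj]
      by_cases hz : t = 0
      · subst hz
        have hsc : (st:Int) + (k:Int) - ((st:Int) + ((0:Nat):Int)) = (k:Int) := by omega
        rw [if_pos hsc]
        have hkc : (st:Int) + (k:Int) - ((st:Int) + ((0:Nat):Int)) = ((k:Nat):Int) := by omega
        rw [hkc, PySem.List.pyGetD_natCast, List.getD_eq_getElem _ _ hklen, hvk]
        rw [Nat.sub_zero, hpoly_last]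
      · have hsc : ¬ ((st:Int) + (k:Int) - ((st:Int) + ((t:Nat):Int)) = (k:Int)) := by omega
        rw [if_neg hsc]
        have hkc : (st:Int) + (k:Int) - ((st:Int) + ((t:Nat):Int)) = (((k - t : Nat)):Int) := by omega
        rw [hkc, PySem.List.pyGetD_natCast]
        have hmid : (buf ++ [-v-1]).getD (n - t) 0 = indices.getD (st + (n - t)) 0 :=
          hpoly_mid (n - t) (by omega)
        rw [hmid]
        have : st + (n - t) = k - t := by omega
        rw [this]
  · rw [List.range_succ, List.map_append, List.map_singleton, if_pos rfl]
    congr 1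
    apply List.ext_getElem
    · simp [hblen]
    · intro i h1 h2
      have hin : i < n := by simpa using h1
      simp only [List.getElem_map, List.getElem_range, if_neg (by omega : ¬ i = n)]
      rw [List.getElem_dropLast, List.getElem_reverse, ← List.getD_eq_getElem _ 0]
      have hidx : (buf ++ [-v-1]).length - 1 - i = n - i := by omega
      rw [hidx, List.getD_eq_getElem _ _ (by omega), ← List.getD_eq_getElem _ 0]

-- B's loop invariant: same shape as A's
lemma pv_mainB (indices : List Int) : ∀ (rest : List Int) (k : Nat) (out buf : List Int) (start : Int),
    0 ≤ start → start ≤ (k : Int) →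
    indices.drop k = rest →
    PySem.List.slice indices (some start) (some (k : Int)) = buf →
    ((PySem.List.enumerate rest (k : Int)).foldl (pvStepB indices) (out, start)).1
      = out ++ (pvGroups buf rest).flatMap pvTransform := by
  intro rest
  induction rest with
  | nil => intro k out buf start _ _ _ _; simp [PySem.List.enumerate_nil, pvGroups]
  | cons v rest ih =>
    intro k out buf start h0 hk hd hs
    rw [PySem.List.enumerate_cons, List.foldl_cons]
    by_cases hv : v < 0
    · have hx : indices[k]? = some v := by
        have h := (List.head?_drop (l := indices) (i := k)).symm
        rw [hd] at h; simpa using h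
      have hstep : pvStepB indices (out, start) ((k : Int), v)
          = (out ++ pvTransform (buf ++ [-v - 1]), (k : Int) + 1) := by
        simp only [pvStepB, if_pos hv]
        rw [pv_inner indices k out buf start v h0 hk hx hs]
      rw [hstep]
      have hd' : indices.drop (k + 1) = rest := by
        rw [← List.drop_drop, hd]; simp
      have hs' : PySem.List.slice indices (some ((k + 1 : Nat) : Int)) (some ((k + 1 : Nat) : Int)) = [] := by
        rw [PySem.List.slice_natCast]; simp
      have := ih (k + 1) (out ++ pvTransform (buf ++ [-v - 1])) [] ((k + 1 : Nat) : Int)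
        (by positivity) (le_refl _) hd' hs'
      push_cast at this ⊢
      rw [this]
      simp [pvGroups, hv, List.flatMap_cons]
    · have hstep : pvStepB indices (out, start) ((k : Int), v) = (out, start) := by
        simp [pvStepB, hv]
      rw [hstep]
      have hd' : indices.drop (k + 1) = rest := by
        rw [← List.drop_drop, hd]; simp
      have hs' : PySem.List.slice indices (some start) (some ((k + 1 : Nat) : Int)) = buf ++ [v] :=
        by push_cast; exact pv_slice_ext indices start k v rest h0 hk hd ▸ (by rw [hs])
      have := ih (k + 1) out (buf ++ [v]) start h0 (by push_cast; omega) hd' hs'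
      push_cast at this ⊢
      rw [this]
      simp [pvGroups, hv]

-- ===== VERDICT (by name: the statement is the Claim_ definition above) =====
theorem flip_winding_py_spec : Claim_equal_flip_winding_py := by
  intro indices _
  unfold Spec_flip_winding_py flip_winding_py flip_winding_py_alt
  have hA := pv_mainA indices indices 0 [] [] 0 (le_refl _) (by simp) (by simp)
    (by rw [show ((0:Nat):Int) = 0 from rfl, PySem.List.slice_toNat indices le_rfl le_rfl]; simp)
  have hB := pv_mainB indices indices 0 [] [] 0 (le_refl _) (by simp) (by simp)
    (by rw [show ((0:Nat):Int) = 0 from rfl, PySem.List.slice_toNat indices le_rfl le_rfl]; simp)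
  simp only [Nat.cast_zero] at hA hB
  rw [hB, hA]
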